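-- pv_equiv track=rewrite | github.com/uy-rrodriguez/phd_deft23_medhsake | run_bert_mcq_variable_choices.py | expand_answers
-- ===== SOURCE A (Python) =====
-- import itertools
--
-- def expand_answers(instance: dict) -> dict[str, str]:
--     choices = sorted(list(instance["answers"].keys()))
--     new_answers = {}
--     combinations = []
--     for i in range(1, len(choices) + 1):
--         combinations.extend(itertools.combinations(choices, i))
--     for comb in combinations:
--         comb = sorted(comb)
--         new_answers[" ".join(comb)] = "; ".join([
--             f"({letter}) {instance['answers'][letter]}"
--             for letter in comb
--         ])
--     return new_answers
-- ===== SOURCE B (Python) =====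
-- def expand_answers(instance: dict) -> dict[str, str]:
--     answers = instance["answers"]
--     letters = sorted(answers.keys())
--
--     def fmt(c):
--         return f"({c}) {answers[c]}"
--
--     def pick(ls, k):
--         # (key, value) pairs for the size-k combinations of ls, in lexicographic order
--         if k == 0:
--             return [("", "")]
--         if not ls:
--             return []
--         c, rest = ls[0], ls[1:]
--         if k == 1:
--             here = [(c, fmt(c))]
--         else:
--             here = [(c + " " + key, fmt(c) + "; " + val)
--                     for key, val in pick(rest, k - 1)]
--         return here + pick(rest, k)
--
--     new_answers = {}
--     for k in range(1, len(letters) + 1):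
--         for key, val in pick(letters, k):
--             new_answers[key] = val
--     return new_answers
-- ===== Notes on version B (the rewrite author's own statement) =====
-- stated objective: alternative
-- what changed: B drops itertools and the two-phase 'collect all combinations, then re-sort and format each via repeated dict lookups': a single recursion pick(letters, k) builds each subset's joined key and formatted value strings directly in the same order, so no combination tuples are materialised and no per-subset sort is done.
import Mathlib
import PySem

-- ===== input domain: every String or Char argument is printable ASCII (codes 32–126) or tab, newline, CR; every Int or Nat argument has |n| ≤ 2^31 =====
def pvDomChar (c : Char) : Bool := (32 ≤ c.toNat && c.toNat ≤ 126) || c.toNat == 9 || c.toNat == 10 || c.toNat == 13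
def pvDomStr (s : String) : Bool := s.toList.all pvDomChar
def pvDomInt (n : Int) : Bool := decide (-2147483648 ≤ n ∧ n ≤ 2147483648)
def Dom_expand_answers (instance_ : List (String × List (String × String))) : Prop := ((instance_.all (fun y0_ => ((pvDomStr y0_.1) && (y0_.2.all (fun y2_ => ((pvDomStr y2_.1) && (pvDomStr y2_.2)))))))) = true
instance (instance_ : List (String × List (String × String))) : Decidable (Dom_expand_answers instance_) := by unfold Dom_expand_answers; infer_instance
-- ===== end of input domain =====

-- B replaces A's two-phase "materialise all itertools combinations, then re-sort each and format it via
-- repeated dict lookups" by one recursion that builds each subset's key and value strings directly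
-- (same return value; objective: simpler/alternative decomposition).

-- ===== PORT A =====
-- itertools.combinations(choices, k): the library call, ported as the standard recursion that yields
-- the tuples in the same (lexicographic-by-index) order as itertools does; exact for k ≥ 0.
def pvCombA (k : Nat) (xs : List String) : List (List String) :=
  match k, xs with
  | 0, _ => [[]]
  | _ + 1, [] => []
  | k + 1, x :: rest => ((pvCombA k rest).map (fun c => x :: c)) ++ pvCombA (k + 1) rest

def expand_answers (instance_ : List (String × List (String × String))) : List (String × String) :=
  -- instance["answers"]: first-match lookup; the KeyError case (no "answers" key) is excluded by Pre_.
  let answers := ((PySem.Dict.mk instance_).get? "answers").getD []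
  let choices := PySem.List.sorted ((PySem.Dict.mk answers).keys) (fun x => x)
  -- combinations = []; for i in range(1, len(choices)+1): combinations.extend(itertools.combinations(choices, i))
  let combinations := (PySem.List.pyRange 1 ((choices.length : Int) + 1) 1).foldl
      (fun acc i => acc ++ pvCombA i.toNat choices) []
  -- for comb in combinations: comb = sorted(comb); new_answers[" ".join(comb)] = "; ".join([...])
  (combinations.foldl (fun d comb0 =>
      let comb := PySem.List.sorted comb0 (fun x => x)
      d.insert (PySem.Str.join " " comb)
        (PySem.Str.join "; " (comb.map (fun letter =>
          "(" ++ letter ++ ") " ++ ((PySem.Dict.mk answers).get? letter).getD "")))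
    ) PySem.Dict.empty).items

-- ===== PORT B =====
-- f"({c}) {answers[c]}" (the letter is always a key of answers, so the lookup succeeds)
def pvFmtB (answers : List (String × String)) (c : String) : String :=
  "(" ++ c ++ ") " ++ ((PySem.Dict.mk answers).get? c).getD ""

-- pick(ls, k): (key, value) pairs for the size-k combinations of ls, in lexicographic order
def pvPickB (answers : List (String × String)) (ls : List String) (k : Nat) : List (String × String) :=
  match k, ls with
  | 0, _ => [("", "")]
  | _ + 1, [] => []
  | 1, c :: rest => (c, pvFmtB answers c) :: pvPickB answers rest 1
  | k + 2, c :: rest =>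
      ((pvPickB answers rest (k + 1)).map
        (fun p => (c ++ " " ++ p.1, pvFmtB answers c ++ "; " ++ p.2)))
      ++ pvPickB answers rest (k + 2)

def expand_answers_alt (instance_ : List (String × List (String × String))) : List (String × String) :=
  let answers := ((PySem.Dict.mk instance_).get? "answers").getD []
  let letters := PySem.List.sorted ((PySem.Dict.mk answers).keys) (fun x => x)
  ((PySem.List.pyRange 1 ((letters.length : Int) + 1) 1).foldl
      (fun d k => (pvPickB answers letters k.toNat).foldl (fun d p => d.insert p.1 p.2) d)
      PySem.Dict.empty).items

-- ===== PRECONDITION & SPEC =====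
-- Pre_ excludes exactly the inputs with no "answers" key, on which the Python A raises KeyError.
def Pre_expand_answers (instance_ : List (String × List (String × String))) : Prop :=
  "answers" ∈ instance_.map Prod.fst
instance (instance_ : List (String × List (String × String))) : Decidable (Pre_expand_answers instance_) := by unfold Pre_expand_answers; infer_instance

def pvWitness_expand_answers : (List (String × List (String × String))) :=
  [("answers", [("a", "yes"), ("b", "no")])]

def Spec_expand_answers (instance_ : List (String × List (String × String))) (out : List (String × String)) : Prop := out = expand_answers_alt instance_
instance (instance_ : List (String × List (String × String))) (out : List (String × String)) : Decidable (Spec_expand_answers instance_ out) := by unfold Spec_expand_answers; infer_instance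

-- ===== CLAIM (what is proved, stated in full; the proofs are below) =====
def Claim_equal_expand_answers : Prop := ∀ (instance_ : List (String × List (String × String))), Dom_expand_answers instance_ → Pre_expand_answers instance_ → Spec_expand_answers instance_ (expand_answers instance_)

-- ===== LEMMAS AND PROOFS =====

-- the (key, value) pair A computes for an (already sorted) combination c
def pvKV (answers : List (String × String)) (c : List String) : String × String :=
  (PySem.Str.join " " c, PySem.Str.join "; " (c.map (pvFmtB answers)))

theorem pvStrJoin_nil (sep : String) : PySem.Str.join sep [] = "" := by
  have h : (PySem.Str.join sep []).toList = ("" : String).toList := by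
    simp [PySem.Str.toList_join, PySem.Chars.join_nil]
  exact String.toList_inj.mp h

theorem pvStrJoin_singleton (sep p : String) : PySem.Str.join sep [p] = p := by
  have h : (PySem.Str.join sep [p]).toList = p.toList := by
    simp [PySem.Str.toList_join, PySem.Chars.join_singleton]
  exact String.toList_inj.mp h

theorem pvStrJoin_cons (sep x : String) (c : List String) (hc : c ≠ []) :
    PySem.Str.join sep (x :: c) = x ++ sep ++ PySem.Str.join sep c := by
  obtain ⟨q, rest, rfl⟩ := List.exists_cons_of_ne_nil hc
  have h : (PySem.Str.join sep (x :: q :: rest)).toList = (x ++ sep ++ PySem.Str.join sep (q :: rest)).toList := by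
    simp [PySem.Str.toList_join, PySem.Chars.join_cons_cons]
  exact String.toList_inj.mp h

theorem pvCombA_sublist (xs : List String) : ∀ k, ∀ c ∈ pvCombA k xs, c.Sublist xs := by
  induction xs with
  | nil =>
      intro k c hc
      cases k with
      | zero => simp [pvCombA] at hc; simp [hc]
      | succ k => simp [pvCombA] at hc
  | cons x rest ih =>
      intro k c hc
      cases k with
      | zero => simp [pvCombA] at hc; simp [hc]
      | succ k =>
          simp only [pvCombA, List.mem_append, List.mem_map] at hc
          rcases hc with ⟨c', hc', rfl⟩ | hc
          · exact List.Sublist.cons₂ x (ih k c' hc')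
          · exact List.Sublist.cons x (ih (k + 1) c hc)

theorem pvCombA_ne_nil (xs : List String) : ∀ k, ∀ c ∈ pvCombA (k + 1) xs, c ≠ [] := by
  induction xs with
  | nil => intro k c hc; simp [pvCombA] at hc
  | cons x rest ih =>
      intro k c hc
      simp only [pvCombA, List.mem_append, List.mem_map] at hc
      rcases hc with ⟨c', _, rfl⟩ | hc
      · simp
      · exact ih k c hc

theorem pvPickB_eq_map (answers : List (String × String)) (xs : List String) :
    ∀ k, pvPickB answers xs k = (pvCombA k xs).map (pvKV answers) := by
  induction xs with
  | nil =>
      intro k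
      cases k with
      | zero => simp [pvPickB, pvCombA, pvKV, pvStrJoin_nil]
      | succ k => simp [pvPickB, pvCombA]
  | cons x rest ih =>
      intro k
      match k with
      | 0 => simp [pvPickB, pvCombA, pvKV, pvStrJoin_nil]
      | 1 =>
          simp only [pvPickB, pvCombA, ih, List.map_cons,
            List.map_nil, List.cons_append, List.nil_append]
          congr 1
          simp [pvKV, pvStrJoin_singleton]
      | (k + 2) =>
          simp only [pvPickB, pvCombA, ih, List.map_append, List.map_map]
          congr 1
          apply List.map_congr_left
          intro c hc
          have hne : c ≠ [] := pvCombA_ne_nil rest k c hc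
          simp only [Function.comp_apply, pvKV, List.map_cons]
          have hm : (c.map (pvFmtB answers)) ≠ [] := by
            intro h; exact hne (List.map_eq_nil_iff.mp h)
          rw [pvStrJoin_cons " " x c hne, pvStrJoin_cons "; " (pvFmtB answers x) _ hm]

theorem pvSorted_comb_eq (choices : List String) (hp : choices.Pairwise (· ≤ ·)) :
    ∀ k, ∀ c ∈ pvCombA k choices, PySem.List.sorted c (fun x => x) = c := by
  intro k c hc
  apply PySem.List.sorted_eq_self_of_pairwise
  exact List.Pairwise.sublist (pvCombA_sublist choices k c hc) hp

-- ===== VERDICT (by name: the statement is the Claim_ definition above) =====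
theorem expand_answers_spec : Claim_equal_expand_answers := by
  intro instance_ _ _
  unfold Spec_expand_answers expand_answers expand_answers_alt
  dsimp only
  set answers := ((PySem.Dict.mk instance_).get? "answers").getD [] with hans
  set choices := PySem.List.sorted ((PySem.Dict.mk answers).keys) (fun x => x) with hch
  have hp : choices.Pairwise (fun a b => a ≤ b) :=
    PySem.List.sorted_pairwise ((PySem.Dict.mk answers).keys) (fun x => x)
  congr 1
  rw [PySem.List.foldl_append_eq_flatMap, List.nil_append, List.foldl_flatMap]
  apply PySem.List.foldl_congr_mem
  intro d i _
  rw [pvPickB_eq_map, List.foldl_map]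
  apply PySem.List.foldl_congr_mem
  intro d' c hc
  rw [pvSorted_comb_eq choices hp i.toNat c hc]
  rfl
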